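-- pv_equiv track=rewrite | github.com/Davidtalabi/RedditClone | helper_functions.py | salt_password
-- ===== SOURCE A (Python) =====
-- def salt_password(password):
--     #salting the password, insert "bob" for every 2 characters
--     iterations = 0
--     password_array = []
--     for char in password:
--         iterations += 1
--         password_array.append(char)
--         if iterations % 2 == 0:
--             password_array.append('Bob')
--
--     return ''.join(password_array)
-- ===== SOURCE B (Python) =====
-- def salt_password(password):
--     # chunked stride: take two characters at a time, append 'Bob' after each full pair
--     pieces = []
--     for i in range(0, len(password), 2):
--         chunk = ''.join(password[i:i+2])
--         pieces.append(chunk)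
--         if len(chunk) == 2:
--             pieces.append('Bob')
--     return ''.join(pieces)
-- ===== Notes on version B (the rewrite author's own statement) =====
-- stated objective: alternative
-- what changed: Replaces the per-character counter-with-modulo pass by a step-2 chunked stride that emits each two-character slice followed by the salt word after every full pair.
import Mathlib
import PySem

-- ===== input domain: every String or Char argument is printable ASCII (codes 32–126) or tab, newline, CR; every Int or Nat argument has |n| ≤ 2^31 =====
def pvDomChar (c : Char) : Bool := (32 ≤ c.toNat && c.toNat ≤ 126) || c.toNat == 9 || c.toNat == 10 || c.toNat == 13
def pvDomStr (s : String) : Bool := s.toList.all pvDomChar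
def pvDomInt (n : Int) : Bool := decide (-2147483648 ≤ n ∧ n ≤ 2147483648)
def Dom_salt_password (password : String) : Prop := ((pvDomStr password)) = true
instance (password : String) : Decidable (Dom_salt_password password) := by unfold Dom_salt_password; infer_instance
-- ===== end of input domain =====

-- B replaces A's per-character counter-with-modulo pass by a step-2 chunked stride (same output, same cost).


-- ===== PORT A =====
-- A's for-loop: counter `iterations`, accumulator `password_array` (here a List Char, joined at the end)
def saltA_loop (chars : List Char) (iterations : Nat) (acc : List Char) : List Char :=
  match chars with
  | [] => acc
  | c :: rest =>
    let it := iterations + 1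
    let acc1 := acc ++ [c]
    let acc2 := if it % 2 == 0 then acc1 ++ "Bob".toList else acc1
    saltA_loop rest it acc2

def salt_password (password : String) : String :=
  String.mk (saltA_loop password.toList 0 [])

-- ===== PORT B =====
-- B's step-2 stride: each iteration takes the slice password[i:i+2] and appends 'Bob' after a full pair
def saltB_chunks (chars : List Char) : List Char :=
  match chars with
  | a :: b :: rest => a :: b :: ("Bob".toList ++ saltB_chunks rest)
  | chunk => chunk

def salt_password_alt (password : String) : String :=
  String.mk (saltB_chunks password.toList)

-- ===== PRECONDITION & SPEC =====
def Spec_salt_password (password : String) (out : String) : Prop := out = salt_password_alt password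
instance (password : String) (out : String) : Decidable (Spec_salt_password password out) := by unfold Spec_salt_password; infer_instance

-- ===== CLAIM (what is proved, stated in full; the proofs are below) =====
def Claim_equal_salt_password : Prop := ∀ (password : String), Dom_salt_password password → Spec_salt_password password (salt_password password)

-- ===== LEMMAS AND PROOFS =====
-- Loop invariant: from an even counter, A's loop appends exactly B's chunked output.
theorem saltA_loop_eq (chars : List Char) : ∀ (i : Nat) (acc : List Char),
    i % 2 = 0 → saltA_loop chars i acc = acc ++ saltB_chunks chars := by
  induction chars using saltB_chunks.induct with
  | case1 a b rest ih =>
    intro i acc hi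
    have h1 : (i + 1) % 2 ≠ 0 := by omega
    have h2 : (i + 2) % 2 = 0 := by omega
    simp only [saltA_loop, saltB_chunks, beq_iff_eq, h1, h2]
    rw [ih (i + 2) _ h2]
    simp
  | case2 chunk hshape =>
    intro i acc hi
    match chunk, hshape with
    | [], _ => simp [saltA_loop, saltB_chunks]
    | [a], _ =>
      have h1 : (i + 1) % 2 ≠ 0 := by omega
      simp [saltA_loop, saltB_chunks, h1]
    | a :: b :: rest, h => exact (h a b rest rfl).elim

-- ===== VERDICT (by name: the statement is the Claim_ definition above) =====
theorem salt_password_spec : Claim_equal_salt_password := by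
  intro p _
  unfold Spec_salt_password salt_password salt_password_alt
  rw [saltA_loop_eq _ 0 [] rfl]
  simp
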